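-- pv_equiv track=rewrite | github.com/quantum-guardians/mr2s-module | mr2s_module/util/planar_graph.py | build_face_edges_map
-- ===== SOURCE A (Python) =====
-- EdgeKey = tuple[int, int]
--
-- def face_edges(face: list[int] | tuple[int, ...]) -> set[EdgeKey]:
--   """Return canonical undirected edge keys for one cyclic face boundary."""
--   return {
--     tuple(sorted((face[index], face[(index + 1) % len(face)])))
--     for index in range(len(face))
--   }
--
-- def build_face_edges_map(
--     faces: list[list[int]],
-- ) -> dict[EdgeKey, list[int]]:
--   """Map each canonical edge key to the face indices that contain it."""
--   face_edges_map: dict[EdgeKey, list[int]] = {}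
--   for face_index, face in enumerate(faces):
--     for edge in face_edges(face):
--       face_edges_map.setdefault(edge, []).append(face_index)
--   return face_edges_map
-- ===== SOURCE B (Python) =====
-- def build_face_edges_map(
--     faces: list[list[int]],
-- ) -> dict[tuple[int, int], list[int]]:
--     """Map each canonical edge key to the face indices that contain it."""
--     # Per-face canonical edge data, computed once up front.
--     edge_lists = [
--         [tuple(sorted((face[i], face[(i + 1) % len(face)]))) for i in range(len(face))]
--         for face in faces
--     ]
--     edge_sets = [set(el) for el in edge_lists]
--     # Distinct edges in first-occurrence order across all faces.
--     ordered = dict.fromkeys(e for el in edge_lists for e in el)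
--     # Inverted loops: for each edge, scan every face for membership.
--     return {
--         e: [i for i, es in enumerate(edge_sets) if e in es]
--         for e in ordered
--     }
-- ===== Notes on version B (the rewrite author's own statement) =====
-- stated objective: alternative
-- what changed: A accumulates face indices into a dict with setdefault while iterating faces; B inverts the loop structure: it precomputes each face's canonical edge list and edge set once, takes the distinct edges in first-occurrence order via dict.fromkeys, and then builds each edge's value by scanning all faces for membership ([i for i, es in enumerate(edge_sets) if e in es]) instead of accumulating during the face traversal.
import Mathlib
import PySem

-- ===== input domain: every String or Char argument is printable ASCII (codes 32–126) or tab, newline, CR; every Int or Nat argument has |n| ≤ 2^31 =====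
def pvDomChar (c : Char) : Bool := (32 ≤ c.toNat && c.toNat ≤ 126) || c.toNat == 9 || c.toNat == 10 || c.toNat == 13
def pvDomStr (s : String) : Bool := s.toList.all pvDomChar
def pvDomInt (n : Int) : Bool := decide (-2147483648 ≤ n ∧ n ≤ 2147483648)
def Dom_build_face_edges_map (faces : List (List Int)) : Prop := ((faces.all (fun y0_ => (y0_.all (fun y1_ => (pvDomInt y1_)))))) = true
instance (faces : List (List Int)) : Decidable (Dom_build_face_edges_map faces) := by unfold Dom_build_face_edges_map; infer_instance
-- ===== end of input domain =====

-- B inverts the loop structure: it precomputes each face's edge list once, then builds the result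
-- per distinct edge by scanning all faces for membership (alternative decomposition, same result).

-- ===== PORT A =====
-- tuple(sorted((x, y))) for a 2-tuple, returned as a pair (sorted of a 2-list has length 2, the catch-all is unreachable)
def pvSortedPair (x y : Int) : Int × Int :=
  match PySem.List.sorted [x, y] (fun a => a) with
  | [a, b] => (a, b)
  | _ => (x, y)

-- the comprehension body '[tuple(sorted((face[i], face[(i+1) % len(face)]))) for i in range(len(face))]'
-- (both Pythons contain this expression verbatim: A inside its set comprehension, B as a list comprehension);
-- face[i] / face[(i+1) % len(face)] never raise (i comes from range(len(face))), so pyGetD is exact here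
def pvEdgeList (face : List Int) : List (Int × Int) :=
  (PySem.List.pyRange 0 (PySem.List.len face) 1).map (fun index =>
    pvSortedPair (PySem.List.pyGetD face index 0)
      (PySem.List.pyGetD face (PySem.Int.mod (index + 1) (PySem.List.len face)) 0))

def face_edges (face : List Int) : PySem.Set (Int × Int) :=
  PySem.Set.ofList (pvEdgeList face)

def build_face_edges_map (faces : List (List Int)) : List (Int × Int × List Int) :=
  let d := (PySem.List.enumerate faces 0).foldl
    (fun d p => (face_edges p.2).foldl
      (fun d edge => d.modify edge [] (· ++ [p.1])) d)   -- face_edges_map.setdefault(edge, []).append(face_index)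
    (PySem.Dict.empty : PySem.Dict (Int × Int) (List Int))
  d.items.map (fun p => (p.1.1, p.1.2, p.2))             -- dict[(a,b)] = l  as the triple (a, b, l)

-- ===== PORT B =====
def build_face_edges_map_alt (faces : List (List Int)) : List (Int × Int × List Int) :=
  let edgeLists := faces.map pvEdgeList
  let edgeSets := edgeLists.map (fun el => PySem.Set.ofList el)
  -- 'dict.fromkeys(e for el in edge_lists for e in el)': distinct edges, first-occurrence order
  let ordered := PySem.List.dedup (edgeLists.flatMap (fun el => el))
  -- inverted loops: '[i for i, es in enumerate(edge_sets) if e in es]' for each edge e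
  ordered.map (fun e => (e.1, e.2,
    ((PySem.List.enumerate edgeSets 0).filter (fun p => PySem.Set.contains p.2 e)).map (fun p => p.1)))

-- ===== PRECONDITION & SPEC =====
def Spec_build_face_edges_map (faces : List (List Int)) (out : List (Int × Int × List Int)) : Prop := out = build_face_edges_map_alt faces
instance (faces : List (List Int)) (out : List (Int × Int × List Int)) : Decidable (Spec_build_face_edges_map faces out) := by unfold Spec_build_face_edges_map; infer_instance

-- ===== CLAIM (what is proved, stated in full; the proofs are below) =====
def Claim_equal_build_face_edges_map : Prop := ∀ (faces : List (List Int)), Dom_build_face_edges_map faces → Spec_build_face_edges_map faces (build_face_edges_map faces)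

-- ===== LEMMAS AND PROOFS =====

-- Set.update past an 'add': the added element is absorbed into the front set
theorem pv_update_add {α : Type} [BEq α] [LawfulBEq α] (s t : PySem.Set α) (x : α) :
    PySem.Set.update s (PySem.Set.add t x) = PySem.Set.add (PySem.Set.update s t) x := by
  by_cases hx : x ∈ t
  · rw [PySem.Set.add_of_mem hx,
      PySem.Set.add_of_mem (show x ∈ PySem.Set.update s t from (PySem.Set.mem_update _ _ _).2 (Or.inr hx))]
  · rw [PySem.Set.add_of_not_mem hx]
    simp [PySem.Set.update, List.foldl_append, PySem.Set.add]

theorem pv_update_update {α : Type} [BEq α] [LawfulBEq α] (l : List α) (s t : PySem.Set α) :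
    PySem.Set.update s (PySem.Set.update t l) = PySem.Set.update (PySem.Set.update s t) l := by
  induction l generalizing t with
  | nil => rfl
  | cons x l ih =>
    show PySem.Set.update s (PySem.Set.update (PySem.Set.add t x) l) = _
    rw [ih, pv_update_add]
    rfl

-- updating with an already-deduplicated list is updating with the raw list
theorem pv_update_ofList {α : Type} [BEq α] [LawfulBEq α] (l : List α) (s : PySem.Set α) :
    PySem.Set.update s (PySem.Set.ofList l) = PySem.Set.update s l := by
  have h := pv_update_update l s (PySem.Set.empty : PySem.Set α)
  simpa [PySem.Set.ofList_eq_foldl, PySem.Set.update, PySem.Set.empty] using h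

-- the flattened per-face-deduplicated edge stream has the same ordered dedup as the raw stream
theorem pv_ofList_flat {α β : Type} [BEq α] [LawfulBEq α] (g : β → List α) (ps : List β) (s : PySem.Set α) :
    PySem.Set.update s (ps.flatMap (fun p => PySem.Set.ofList (g p))) = PySem.Set.update s (ps.flatMap g) := by
  induction ps generalizing s with
  | nil => rfl
  | cons p ps ih =>
    rw [List.flatMap_cons, List.flatMap_cons]
    show PySem.Set.update s _ = _
    rw [show ∀ (l1 l2 : List α), PySem.Set.update s (l1 ++ l2) = PySem.Set.update (PySem.Set.update s l1) l2
      from fun l1 l2 => List.foldl_append, pv_update_ofList, ih,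
      ← (show ∀ (l1 l2 : List α), PySem.Set.update s (l1 ++ l2) = PySem.Set.update (PySem.Set.update s l1) l2
      from fun l1 l2 => List.foldl_append)]

-- one face's deduplicated (edge, i) segment of A's stream, filtered at key e
theorem pv_segment (S : PySem.Set (Int × Int)) (hS : S.Nodup) (i : Int) (e : Int × Int) :
    ((S.map (fun x => (x, i))).filter (fun q => q.1 == e)).map (fun q => q.2)
    = if e ∈ S then [i] else [] := by
  rw [List.filter_map]
  rw [show ((fun q : (Int × Int) × Int => q.1 == e) ∘ fun x => (x, i)) = (fun x : Int × Int => x == e) from rfl]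
  rw [List.filter_beq]
  by_cases he : e ∈ S
  · rw [if_pos he, List.count_eq_one_of_mem hS he]; rfl
  · rw [if_neg he, List.count_eq_zero_of_not_mem he]; rfl

-- A's grouped values at key e are exactly B's inverted membership scan over the faces
theorem pv_values (g : List Int → List (Int × Int)) (ps : List (Int × List Int)) (e : Int × Int) :
    ((ps.flatMap (fun p => (PySem.Set.ofList (g p.2)).map (fun x => (x, p.1)))).filter
        (fun q => q.1 == e)).map (fun q => q.2)
    = (ps.filter (fun p => PySem.Set.contains (PySem.Set.ofList (g p.2)) e)).map (fun p => p.1) := by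
  induction ps with
  | nil => rfl
  | cons p ps ih =>
    rw [List.flatMap_cons, List.filter_append, List.map_append, ih,
      pv_segment _ (PySem.Set.nodup_ofList _) p.1 e, List.filter_cons]
    by_cases he : e ∈ PySem.Set.ofList (g p.2)
    · rw [if_pos he, if_pos (by simpa [PySem.Set.contains_iff] using he)]
      rfl
    · rw [if_neg he, if_neg (by simpa [PySem.Set.contains_iff] using he)]
      rfl

theorem pv_enumerate_map {α β : Type} (h : α → β) (xs : List α) (s : Int) :
    PySem.List.enumerate (xs.map h) s = (PySem.List.enumerate xs s).map (fun p => (p.1, h p.2)) := by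
  induction xs generalizing s with
  | nil => rfl
  | cons x xs ih => simp [PySem.List.enumerate_cons, ih]

theorem pv_main_eq (faces : List (List Int)) :
    build_face_edges_map faces = build_face_edges_map_alt faces := by
  unfold build_face_edges_map build_face_edges_map_alt
  -- A: turn the nested fold into a single fold over the flattened (edge, index) stream
  simp only [show ∀ (d : PySem.Dict (Int × Int) (List Int)) (p : Int × List Int),
      (face_edges p.2).foldl (fun d edge => d.modify edge [] (· ++ [p.1])) d
      = ((face_edges p.2).map (fun e => (e, p.1))).foldl (fun d pr => d.modify pr.1 [] (· ++ [pr.2])) d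
    from fun d p => by rw [List.foldl_map]]
  rw [← List.foldl_flatMap]
  -- A's dict: items as keys paired with grouped values
  have hnd : ((((PySem.List.enumerate faces 0).flatMap (fun p => (face_edges p.2).map (fun e => (e, p.1)))).foldl
      (fun d pr => d.modify pr.1 [] (· ++ [pr.2])) (PySem.Dict.empty : PySem.Dict (Int × Int) (List Int))).keys).Nodup := by
    apply PySem.Dict.nodup_keys_foldl_modify_key
    simp [PySem.Dict.empty]
  rw [PySem.Dict.items_eq_map_keys _ hnd []]
  rw [PySem.Dict.keys_foldl_modify_key]
  simp only [PySem.Dict.getD_foldl_modify_append, List.map_map]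
  simp only [face_edges, List.map_flatMap, List.map_map, Function.comp_def,
    PySem.List.dedup_eq_ofList, pv_enumerate_map, List.filter_map, pv_values]
  -- the key lists agree: first-occurrence dedup of the flattened edge stream
  have hkeys : PySem.Set.update (PySem.Dict.empty : PySem.Dict (Int × Int) (List Int)).keys
      ((PySem.List.enumerate faces 0).flatMap (fun a => (PySem.Set.ofList (pvEdgeList a.2)).map (fun x => x)))
      = PySem.Set.ofList ((faces.map pvEdgeList).flatMap (fun el => el)) := by
    simp only [List.map_id']
    rw [show (PySem.Dict.empty : PySem.Dict (Int × Int) (List Int)).keys = ([] : PySem.Set (Int × Int)) from rfl]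
    rw [pv_ofList_flat]
    have h2 : ∀ (l : List (List Int)) (s : Int),
        (PySem.List.enumerate l s).flatMap (fun a => pvEdgeList a.2) = (l.map pvEdgeList).flatMap (fun el => el) := by
      intro l
      induction l with
      | nil => intro s; rfl
      | cons x l ih => intro s; simp [PySem.List.enumerate_cons, ih]
    rw [← h2 faces 0]
    rfl
  rw [hkeys]
  simp only [show ∀ x : Int × Int, (PySem.Dict.empty : PySem.Dict (Int × Int) (List Int)).getD x [] = [] from fun x => rfl,
    List.nil_append]

-- ===== VERDICT (by name: the statement is the Claim_ definition above) =====
theorem build_face_edges_map_spec : Claim_equal_build_face_edges_map := by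
  intro faces _
  unfold Spec_build_face_edges_map
  exact pv_main_eq faces
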